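-- pv_equiv track=rewrite | github.com/seba3c/python-coding-challenges | src/domino.py | solution
-- ===== SOURCE A (Python) =====
-- def solution(S):
--     max_count = 0
--     if S is not None:
--         tiles = S.split(",")
--         ccount = 0
--         for i in range(0, len(tiles)):
--             cur_tile = tiles[i].split("-")
--             if (i < len(tiles) - 1):
--                 next_tile = tiles[i + 1].split("-")
--                 if cur_tile[1] == next_tile[0]:
--                     ccount += 1
--                 else:
--                     ccount = 0
--             if ccount > max_count:
--                 max_count = ccount
--         max_count = max_count + 1
--     return max_count
-- ===== SOURCE B (Python) =====
-- def solution(S):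
--     # Two-phase rewrite: build the adjacent-match table, run-length encode it,
--     # then take the longest True run (+1).  Same values as the original scan.
--     if S is None:
--         return 0
--     tiles = S.split(",")
--     matches = [a.split("-")[1] == b.split("-")[0] for a, b in zip(tiles, tiles[1:])]
--     runs = []  # run-length encoding of `matches`, most recent run first
--     for m in matches:
--         if runs and runs[0][0] == m:
--             runs[0][1] += 1
--         else:
--             runs.insert(0, [m, 1])
--     best = max([n for k, n in runs if k], default=0)
--     return best + 1
-- ===== Notes on version B (the rewrite author's own statement) =====
-- stated objective: alternative
-- what changed: Replaces the fused max/counter index scan with a two-phase pass: build the list of adjacent-tile matches, run-length encode it, then take the longest True run length plus one.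
import Mathlib
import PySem

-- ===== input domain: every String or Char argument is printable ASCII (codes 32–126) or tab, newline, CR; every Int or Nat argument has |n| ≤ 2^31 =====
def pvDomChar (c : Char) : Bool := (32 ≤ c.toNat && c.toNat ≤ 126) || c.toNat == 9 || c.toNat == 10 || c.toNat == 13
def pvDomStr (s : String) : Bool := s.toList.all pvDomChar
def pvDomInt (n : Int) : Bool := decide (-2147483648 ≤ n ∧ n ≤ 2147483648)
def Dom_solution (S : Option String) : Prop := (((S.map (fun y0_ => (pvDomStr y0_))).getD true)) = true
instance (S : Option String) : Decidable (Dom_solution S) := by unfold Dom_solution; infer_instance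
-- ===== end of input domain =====

-- B re-implements A by a different decomposition (match table + run-length encoding + max)
-- with the same O(n) cost; equivalence is proved on all inputs where A returns (Pre_).

-- ===== PORT A =====
def solution (S : Option String) : Int :=
  match S with
  | none => 0
  | some s =>
      let tiles := (PySem.Str.split? s ",").getD []
      let r := (List.range tiles.length).foldl (fun (st : Int × Int) i =>
          let cur := (PySem.Str.split? (tiles.getD i "") "-").getD []
          let cc :=
            if i < tiles.length - 1 then
              let nxt := (PySem.Str.split? (tiles.getD (i + 1) "") "-").getD []
              -- Python A does cur_tile[1], an IndexError when the tile has no dash;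
              -- Pre_solution excludes exactly those inputs, so the default "" is never compared.
              if cur.getD 1 "" == nxt.getD 0 "" then st.2 + 1 else 0
            else st.2
          (if cc > st.1 then cc else st.1, cc)) (0, 0)
      r.1 + 1

-- ===== PORT B =====
-- run-length encoding step: newest run at the head of the list
def pvGrpStep (runs : List (Bool × Int)) (m : Bool) : List (Bool × Int) :=
  match runs with
  | (c, n) :: r => if c == m then (c, n + 1) :: r else (m, 1) :: (c, n) :: r
  | [] => [(m, 1)]

-- max of the lengths of the True runs, default 0 (Source B's `max([...], default=0)`)
def pvBest : List (Bool × Int) → Int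
  | [] => 0
  | (k, n) :: r => if k then max n (pvBest r) else pvBest r

def solution_alt (S : Option String) : Int :=
  match S with
  | none => 0
  | some s =>
      let tiles := (PySem.Str.split? s ",").getD []
      let mlist := (tiles.zip tiles.tail).map (fun p =>
        ((PySem.Str.split? p.1 "-").getD []).getD 1 "" == ((PySem.Str.split? p.2 "-").getD []).getD 0 "")
      let runs := mlist.foldl pvGrpStep []
      pvBest runs + 1

-- ===== PRECONDITION & SPEC =====
-- Pre_ excludes exactly the inputs where Python A raises IndexError (cur_tile[1]):
-- some non-last comma-separated tile contains no dash.  (Python B raises there too.)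
def Pre_solution (S : Option String) : Prop :=
  match S with
  | none => True
  | some s => ∀ t ∈ ((PySem.Str.split? s ",").getD []).dropLast, '-' ∈ t.toList

instance (S : Option String) : Decidable (Pre_solution S) := by
  unfold Pre_solution; cases S <;> infer_instance

def pvWitness_solution : Option String := some "1-2,2-3,5-6"

def Spec_solution (S : Option String) (out : Int) : Prop := out = solution_alt S
instance (S : Option String) (out : Int) : Decidable (Spec_solution S out) := by unfold Spec_solution; infer_instance

-- ===== CLAIM (what is proved, stated in full; the proofs are below) =====
def Claim_equal_solution : Prop := ∀ (S : Option String), Dom_solution S → Pre_solution S → Spec_solution S (solution S)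

-- ===== LEMMAS AND PROOFS =====

-- the current-run counter encoded by a run list
def pvCur : List (Bool × Int) → Int
  | (true, n) :: _ => n
  | _ => 0

-- A's per-match step, on the matches list
def pvStepM (st : Int × Int) (m : Bool) : Int × Int :=
  let cc := if m then st.2 + 1 else 0
  (if cc > st.1 then cc else st.1, cc)

theorem pvBest_nonneg (runs : List (Bool × Int)) : 0 ≤ pvBest runs := by
  induction runs with
  | nil => simp [pvBest]
  | cons p r ih => obtain ⟨k, n⟩ := p; cases k <;> simp [pvBest] <;> omega

theorem pvCur_le_pvBest (runs : List (Bool × Int)) : pvCur runs ≤ pvBest runs := by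
  cases runs with
  | nil => simp [pvCur, pvBest]
  | cons p r =>
      obtain ⟨k, n⟩ := p
      cases k
      · simpa [pvCur, pvBest] using pvBest_nonneg r
      · simp [pvCur, pvBest]

theorem pvStepM_grp (runs : List (Bool × Int)) (m : Bool) :
    pvStepM (pvBest runs, pvCur runs) m = (pvBest (pvGrpStep runs m), pvCur (pvGrpStep runs m)) := by
  cases runs with
  | nil => cases m <;> simp [pvStepM, pvGrpStep, pvBest, pvCur]
  | cons p r =>
      obtain ⟨k, n⟩ := p
      have h1 := pvBest_nonneg r
      cases m <;> cases k <;>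
        simp [pvStepM, pvGrpStep, pvBest, pvCur] <;>
        omega

theorem pvFold_grp (ms : List Bool) (runs : List (Bool × Int)) :
    ms.foldl pvStepM (pvBest runs, pvCur runs) =
      (pvBest (ms.foldl pvGrpStep runs), pvCur (ms.foldl pvGrpStep runs)) := by
  induction ms generalizing runs with
  | nil => simp
  | cons m t ih =>
      simp only [List.foldl_cons, pvStepM_grp runs m]
      exact ih (pvGrpStep runs m)

theorem pvFold_grp_nil (ms : List Bool) :
    ms.foldl pvStepM (0, 0) = (pvBest (ms.foldl pvGrpStep []), pvCur (ms.foldl pvGrpStep [])) :=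
  pvFold_grp ms []

-- the matches list equals the index comprehension A effectively scans
theorem pvMatches_eq (tiles : List String) (g : String → String → Bool) (h : 1 ≤ tiles.length) :
    (tiles.zip tiles.tail).map (fun p => g p.1 p.2) =
      (List.range (tiles.length - 1)).map (fun i => g (tiles.getD i "") (tiles.getD (i + 1) "")) := by
  apply List.ext_getElem
  · simp
  · intro i h1 h2
    have hi : i < tiles.length - 1 := by simpa using h2
    have hi1 : i < tiles.length := by omega
    have hi2 : i + 1 < tiles.length := by omega
    simp [List.getElem_zip, List.getElem_tail, List.getD_eq_getElem?_getD, hi1, hi2]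

-- ===== VERDICT (by name: the statement is the Claim_ definition above) =====
theorem solution_spec : Claim_equal_solution := by
  intro S _hdom _hpre
  unfold Spec_solution
  cases S with
  | none => rfl
  | some s =>
      show solution (some s) = solution_alt (some s)
      unfold solution solution_alt
      simp only []
      set tiles := (PySem.Str.split? s ",").getD [] with htiles
      set g : String → String → Bool := fun a b =>
        ((PySem.Str.split? a "-").getD []).getD 1 "" == ((PySem.Str.split? b "-").getD []).getD 0 "" with hg
      set ms : List Bool := (tiles.zip tiles.tail).map (fun p => g p.1 p.2) with hms
      -- A's per-index step
      set stepA : Int × Int → Nat → Int × Int := fun st i =>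
        let cur := (PySem.Str.split? (tiles.getD i "") "-").getD []
        let cc :=
          if i < tiles.length - 1 then
            let nxt := (PySem.Str.split? (tiles.getD (i + 1) "") "-").getD []
            if cur.getD 1 "" == nxt.getD 0 "" then st.2 + 1 else 0
          else st.2
        (if cc > st.1 then cc else st.1, cc) with hstepA
      show ((List.range tiles.length).foldl stepA (0, 0)).1 + 1 = pvBest (ms.foldl pvGrpStep []) + 1
      rcases Nat.eq_zero_or_pos tiles.length with hn | hn
      · have ht : tiles = [] := List.eq_nil_of_length_eq_zero hn
        simp [ht, hms, pvBest]
      · -- split off the last index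
        have hsplit : List.range tiles.length = List.range (tiles.length - 1) ++ [tiles.length - 1] := by
          conv_lhs => rw [show tiles.length = (tiles.length - 1) + 1 from by omega]
          rw [List.range_succ]
        rw [hsplit, List.foldl_append]
        -- on indices i < length - 1 the step is pvStepM on g-values
        have hcong : (List.range (tiles.length - 1)).foldl stepA (0, 0) =
            (List.range (tiles.length - 1)).foldl
              (fun st i => pvStepM st (g (tiles.getD i "") (tiles.getD (i + 1) ""))) (0, 0) := by
          apply PySem.List.foldl_congr_mem
          intro st i hi
          have hlt : i < tiles.length - 1 := List.mem_range.mp hi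
          simp [hstepA, pvStepM, hlt, hg]
        rw [hcong, ← List.foldl_map, ← pvMatches_eq tiles g hn, ← hms, pvFold_grp_nil]
        -- last index is a no-op on the first component
        have hle := pvCur_le_pvBest (ms.foldl pvGrpStep [])
        simp [hstepA]
        omega
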